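-- pv_equiv track=rewrite | github.com/google/proto-quic | src/build/android/pylib/gtest/gtest_test_instance.py | ConvertTestFilterFileIntoGTestFilterArgument
-- ===== SOURCE A (Python) =====
-- def ConvertTestFilterFileIntoGTestFilterArgument(input_lines):
--   """Converts test filter file contents into --gtest_filter argument.
--
--   See //testing/buildbot/filters/README.md for description of the
--   syntax that |input_lines| are expected to follow.
--
--   See
--   https://github.com/google/googletest/blob/master/googletest/docs/AdvancedGuide.md#running-a-subset-of-the-tests
--   for description of the syntax that --gtest_filter argument should follow.
--
--   Args:
--     input_lines: An iterable (e.g. a list or a file) containing input lines.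
--   Returns:
--     a string suitable for feeding as an argument of --gtest_filter parameter.
--   """
--   # Strip whitespace + skip empty lines and lines beginning with '#'.
--   stripped_lines = (l.strip() for l in input_lines)
--   filter_lines = list(l for l in stripped_lines if l and l[0] != '#')
--
--   # Split the tests into positive and negative patterns (gtest treats
--   # every pattern after the first '-' sign as an exclusion).
--   positive_patterns = ':'.join(l for l in filter_lines if l[0] != '-')
--   negative_patterns = ':'.join(l[1:] for l in filter_lines if l[0] == '-')
--   if negative_patterns:
--     negative_patterns = '-' + negative_patterns
--
--   # Join the filter lines into one, big --gtest_filter argument.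
--   return positive_patterns + negative_patterns
-- ===== SOURCE B (Python) =====
-- def ConvertTestFilterFileIntoGTestFilterArgument(input_lines):
--   """Builds the two joined pattern strings directly in one forward pass:
--   each kept line is appended (with ':' inserted on the fly) to an optional
--   positive/negative accumulator string; no intermediate pattern lists and
--   no join call."""
--   pos = None
--   neg = None
--   for raw in input_lines:
--     line = raw.strip()
--     if not line or line[0] == '#':
--       continue
--     if line[0] == '-':
--       body = line[1:]
--       if neg is None:
--         neg = body
--       else:
--         neg += ':' + body
--     else:
--       if pos is None:
--         pos = line
--       else:
--         pos += ':' + line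
--   return (pos or '') + (('-' + neg) if neg else '')
-- ===== Notes on version B (the rewrite author's own statement) =====
-- stated objective: alternative
-- what changed: Replaces A's staged pipeline (build a filtered list, rescan it twice with comprehensions, join each) with one forward pass that never materialises pattern lists: two optional accumulator strings are grown in place with ':' separators inserted on the fly, so the intermediate list and both join calls disappear.
import Mathlib
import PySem

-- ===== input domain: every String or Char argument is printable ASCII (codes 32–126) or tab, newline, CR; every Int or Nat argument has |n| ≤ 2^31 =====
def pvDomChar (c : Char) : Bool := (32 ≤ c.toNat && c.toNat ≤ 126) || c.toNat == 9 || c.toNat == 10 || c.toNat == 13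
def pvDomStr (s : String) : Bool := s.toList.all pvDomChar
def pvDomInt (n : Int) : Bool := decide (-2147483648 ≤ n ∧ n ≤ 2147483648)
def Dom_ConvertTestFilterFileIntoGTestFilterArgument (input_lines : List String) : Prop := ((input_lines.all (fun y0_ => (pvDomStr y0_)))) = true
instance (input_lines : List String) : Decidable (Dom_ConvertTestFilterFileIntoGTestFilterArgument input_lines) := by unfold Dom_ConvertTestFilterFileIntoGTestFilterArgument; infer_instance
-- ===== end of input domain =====

-- B builds the two joined pattern strings directly in one forward pass over optional string
-- accumulators, instead of A's filtered list, two rescans and two joins; same cost.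

-- ===== PORT A =====
def ConvertTestFilterFileIntoGTestFilterArgument (input_lines : List String) : String :=
  -- stripped_lines = (l.strip() for l in input_lines); filter_lines keeps l if l and l[0] != '#'
  let filter_lines : List String :=
    (input_lines.map PySem.Str.strip).filter
      (fun l => (l != "") && (PySem.Str.pyGet? l 0 != some '#'))
  let positive_patterns : String :=
    PySem.Str.join ":" (filter_lines.filter (fun l => PySem.Str.pyGet? l 0 != some '-'))
  let negative_patterns : String :=
    PySem.Str.join ":" ((filter_lines.filter (fun l => PySem.Str.pyGet? l 0 == some '-')).map
      (fun l => PySem.Str.slice l (some 1) none))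
  let negative_patterns := if negative_patterns != "" then "-" ++ negative_patterns else negative_patterns
  positive_patterns ++ negative_patterns

-- ===== PORT B =====
-- the body of B's for-loop: strip, skip, append to the matching accumulator
def pvStep (acc : Option String × Option String) (raw : String) : Option String × Option String :=
  let line := PySem.Str.strip raw
  if line == "" || PySem.Str.pyGet? line 0 == some '#' then acc
  else if PySem.Str.pyGet? line 0 == some '-' then
    let body := PySem.Str.slice line (some 1) none
    (acc.1, some (match acc.2 with | none => body | some s => s ++ ":" ++ body))
  else
    (some (match acc.1 with | none => line | some s => s ++ ":" ++ line), acc.2)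

def ConvertTestFilterFileIntoGTestFilterArgument_alt (input_lines : List String) : String :=
  let acc := input_lines.foldl pvStep (none, none)
  let posPart := acc.1.getD ""                    -- (pos or '')
  let negPart :=                                  -- ('-' + neg) if neg else ''
    match acc.2 with
    | none => ""
    | some s => if s == "" then "" else "-" ++ s
  posPart ++ negPart

-- ===== PRECONDITION & SPEC =====
def Spec_ConvertTestFilterFileIntoGTestFilterArgument (input_lines : List String) (out : String) : Prop := out = ConvertTestFilterFileIntoGTestFilterArgument_alt input_lines
instance (input_lines : List String) (out : String) : Decidable (Spec_ConvertTestFilterFileIntoGTestFilterArgument input_lines out) := by unfold Spec_ConvertTestFilterFileIntoGTestFilterArgument; infer_instance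

-- ===== CLAIM =====
def Claim_equal_ConvertTestFilterFileIntoGTestFilterArgument : Prop := ∀ (input_lines : List String), Dom_ConvertTestFilterFileIntoGTestFilterArgument input_lines → Spec_ConvertTestFilterFileIntoGTestFilterArgument input_lines (ConvertTestFilterFileIntoGTestFilterArgument input_lines)

-- ===== LEMMAS AND PROOFS =====

-- the lists A builds, as functions of the input, for the induction
def pvKeep (lines : List String) : List String :=
  (lines.map PySem.Str.strip).filter (fun l => (l != "") && (PySem.Str.pyGet? l 0 != some '#'))

def pvPos (lines : List String) : List String :=
  (pvKeep lines).filter (fun l => PySem.Str.pyGet? l 0 != some '-')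

def pvNeg (lines : List String) : List String :=
  ((pvKeep lines).filter (fun l => PySem.Str.pyGet? l 0 == some '-')).map
    (fun l => PySem.Str.slice l (some 1) none)

-- A's result, re-stated through pvPos/pvNeg (definitional: the expressions coincide)
theorem pvA_eq (l : List String) :
    ConvertTestFilterFileIntoGTestFilterArgument l =
      PySem.Str.join ":" (pvPos l) ++
        (if PySem.Str.join ":" (pvNeg l) != "" then "-" ++ PySem.Str.join ":" (pvNeg l)
         else PySem.Str.join ":" (pvNeg l)) := rfl

theorem pvJoin_one (x : String) : PySem.Str.join ":" [x] = x := by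
  rw [← String.toList_inj]
  simp [PySem.Str.toList_join, PySem.Chars.join, List.intercalate]

theorem pvJoin_cons₂ (x y : String) (ys : List String) :
    PySem.Str.join ":" (x :: y :: ys) = x ++ ":" ++ PySem.Str.join ":" (y :: ys) := by
  rw [← String.toList_inj]
  simp [PySem.Str.toList_join, PySem.Chars.join_cons_cons]

-- how B's accumulator absorbs a list of patterns, one at a time
def pvApp (o : Option String) (l : List String) : Option String :=
  l.foldl (fun o x => some (match o with | none => x | some s => s ++ ":" ++ x)) o

theorem pvApp_some (l : List String) : ∀ s : String,
    pvApp (some s) l = some (PySem.Str.join ":" (s :: l)) := by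
  induction l with
  | nil => intro s; simp [pvApp, pvJoin_one]
  | cons x xs ih =>
    intro s
    have h1 : pvApp (some s) (x :: xs) = pvApp (some (s ++ ":" ++ x)) xs := rfl
    rw [h1, ih]
    cases xs with
    | nil => simp [pvJoin_one, pvJoin_cons₂]
    | cons y ys => simp [pvJoin_cons₂, String.append_assoc]

theorem pvApp_none (l : List String) :
    pvApp none l = if l = [] then none else some (PySem.Str.join ":" l) := by
  cases l with
  | nil => rfl
  | cons x xs =>
    have h1 : pvApp none (x :: xs) = pvApp (some x) xs := rfl
    simp [h1, pvApp_some]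

-- B's fold accumulates along A's positive and negative pattern lists
theorem pvStep_foldl (lines : List String) : ∀ p n : Option String,
    lines.foldl pvStep (p, n) = (pvApp p (pvPos lines), pvApp n (pvNeg lines)) := by
  induction lines with
  | nil => intro p n; simp [pvPos, pvNeg, pvKeep, pvApp]
  | cons raw rest ih =>
    intro p n
    simp only [List.foldl_cons]
    by_cases h1 : (PySem.Str.strip raw == "" || PySem.Str.pyGet? (PySem.Str.strip raw) 0 == some '#') = true
    · have h1' := h1
      simp only [Bool.or_eq_true, beq_iff_eq, PySem.Str.pyGet?_eq,
        PySem.Chars.pyGet?_eq_listPyGet?, PySem.Str.toList_strip] at h1'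
      have hkeep : pvKeep (raw :: rest) = pvKeep rest := by
        simp only [pvKeep, List.map_cons, List.filter_cons]
        rcases h1' with h | h
        · simp [h]
        · simp [h]
      simp only [pvStep, h1, if_pos, ih]
      simp [pvPos, pvNeg, hkeep]
    · have h1' := h1
      simp only [Bool.or_eq_true, not_or, beq_iff_eq, PySem.Str.pyGet?_eq,
        PySem.Chars.pyGet?_eq_listPyGet?, PySem.Str.toList_strip] at h1'
      have hkeep : pvKeep (raw :: rest) = PySem.Str.strip raw :: pvKeep rest := by
        simp only [pvKeep, List.map_cons, List.filter_cons]
        simp [h1'.1, h1'.2]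
      by_cases h2 : (PySem.Str.pyGet? (PySem.Str.strip raw) 0 == some '-') = true
      · have h2' := h2
        simp only [beq_iff_eq, PySem.Str.pyGet?_eq,
          PySem.Chars.pyGet?_eq_listPyGet?, PySem.Str.toList_strip] at h2'
        simp only [pvStep, h1, h2, if_pos, Bool.false_eq_true, if_false, ih]
        simp only [pvPos, pvNeg, hkeep, List.filter_cons]
        simp [h2', pvApp]
      · have h2' := h2
        simp only [beq_iff_eq, PySem.Str.pyGet?_eq,
          PySem.Chars.pyGet?_eq_listPyGet?, PySem.Str.toList_strip] at h2'
        simp only [pvStep, h1, h2, Bool.false_eq_true, if_false, ih]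
        simp only [pvPos, pvNeg, hkeep, List.filter_cons]
        simp [h2', pvApp]

-- ===== VERDICT =====
theorem ConvertTestFilterFileIntoGTestFilterArgument_spec : Claim_equal_ConvertTestFilterFileIntoGTestFilterArgument := by
  intro input_lines _
  show ConvertTestFilterFileIntoGTestFilterArgument input_lines = ConvertTestFilterFileIntoGTestFilterArgument_alt input_lines
  rw [pvA_eq]
  simp only [ConvertTestFilterFileIntoGTestFilterArgument_alt, pvStep_foldl, pvApp_none]
  have hj0 : PySem.Str.join ":" ([] : List String) = "" := rfl
  by_cases hn : pvNeg input_lines = []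
  · by_cases hp : pvPos input_lines = [] <;> simp [hp, hn, hj0]
  · by_cases hj : PySem.Str.join ":" (pvNeg input_lines) = "" <;>
      by_cases hp : pvPos input_lines = [] <;> simp [hp, hn, hj, hj0]
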